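-- pv_equiv track=rewrite | github.com/amokatocaloca/NER_proof-of-concept | bilstm-crf/evaluate.py | compute_muc5
-- ===== SOURCE A (Python) =====
-- def compute_muc5(gold, pred):
--     COR = INC = MIS = SPU = 0
--     for g_seq, p_seq in zip(gold, pred):
--         for g, p in zip(g_seq, p_seq):
--             if   g == p:          COR += 1
--             elif g != 'O' and p == 'O': MIS += 1
--             elif g == 'O' and p != 'O': SPU += 1
--             else:                  INC += 1
--     return COR, INC, MIS, SPU
-- ===== SOURCE B (Python) =====
-- def compute_muc5(gold, pred):
--     pairs = [(g, p) for g_seq, p_seq in zip(gold, pred) for g, p in zip(g_seq, p_seq)]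
--     cor = sum(1 for g, p in pairs if g == p)
--     mis = sum(1 for g, p in pairs if g != 'O' and p == 'O')
--     spu = sum(1 for g, p in pairs if g == 'O' and p != 'O')
--     inc = len(pairs) - cor - mis - spu
--     return cor, inc, mis, spu
-- ===== Notes on version B (the rewrite author's own statement) =====
-- stated objective: alternative
-- what changed: Replaces the single stateful elif-dispatch loop with a flattened pair list and four independent counting passes (COR/MIS/SPU by countP, INC derived as the remainder).
import Mathlib
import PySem

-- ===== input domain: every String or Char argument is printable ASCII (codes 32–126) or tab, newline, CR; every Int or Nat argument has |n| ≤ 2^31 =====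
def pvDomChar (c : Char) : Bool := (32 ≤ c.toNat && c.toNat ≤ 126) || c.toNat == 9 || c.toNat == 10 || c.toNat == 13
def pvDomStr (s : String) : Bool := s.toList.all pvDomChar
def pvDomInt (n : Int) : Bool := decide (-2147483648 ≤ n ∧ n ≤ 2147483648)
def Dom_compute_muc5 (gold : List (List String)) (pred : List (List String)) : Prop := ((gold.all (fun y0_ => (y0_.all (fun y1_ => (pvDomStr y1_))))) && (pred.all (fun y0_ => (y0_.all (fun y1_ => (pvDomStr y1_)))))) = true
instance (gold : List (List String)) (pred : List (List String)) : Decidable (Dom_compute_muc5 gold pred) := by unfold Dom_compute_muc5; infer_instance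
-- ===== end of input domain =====

-- ===== PORT A =====
-- literal port of A: one pass, elif chain updating four counters
def muc5Step (st : Int × Int × Int × Int) (gp : String × String) : Int × Int × Int × Int :=
  let (c, i, m, s) := st
  if gp.1 == gp.2 then (c + 1, i, m, s)
  else if gp.1 != "O" && gp.2 == "O" then (c, i, m + 1, s)
  else if gp.1 == "O" && gp.2 != "O" then (c, i, m, s + 1)
  else (c, i + 1, m, s)

def compute_muc5 (gold : List (List String)) (pred : List (List String)) : Int × Int × Int × Int :=
  (gold.zip pred).foldl (fun st gp => (gp.1.zip gp.2).foldl muc5Step st) (0, 0, 0, 0)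

-- ===== PORT B =====
-- port of B: flatten the aligned pairs, count each category by its own pass, INC = remainder
def compute_muc5_alt (gold : List (List String)) (pred : List (List String)) : Int × Int × Int × Int :=
  let pairs := (gold.zip pred).flatMap (fun gp => gp.1.zip gp.2)
  let cor : Int := pairs.countP (fun gp => gp.1 == gp.2)
  let mis : Int := pairs.countP (fun gp => gp.1 != "O" && gp.2 == "O")
  let spu : Int := pairs.countP (fun gp => gp.1 == "O" && gp.2 != "O")
  let inc : Int := (pairs.length : Int) - cor - mis - spu
  (cor, inc, mis, spu)

-- ===== PRECONDITION & SPEC =====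
def Spec_compute_muc5 (gold : List (List String)) (pred : List (List String)) (out : Int × Int × Int × Int) : Prop := out = compute_muc5_alt gold pred
instance (gold : List (List String)) (pred : List (List String)) (out : Int × Int × Int × Int) : Decidable (Spec_compute_muc5 gold pred out) := by unfold Spec_compute_muc5; infer_instance

-- ===== CLAIM (what is proved, stated in full; the proofs are below) =====
def Claim_equal_compute_muc5 : Prop := ∀ (gold : List (List String)) (pred : List (List String)), Dom_compute_muc5 gold pred → Spec_compute_muc5 gold pred (compute_muc5 gold pred)

-- ===== LEMMAS AND PROOFS =====

-- ===== VERDICT (by name: the statement is the Claim_ definition above) =====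
-- inner-loop invariant: folding muc5Step adds the per-category counts of the list
theorem muc5_foldl_counts (l : List (String × String)) (c i m s : Int) :
    l.foldl muc5Step (c, i, m, s) =
      (c + (l.countP (fun gp => gp.1 == gp.2) : Int),
       i + ((l.length : Int) - (l.countP (fun gp => gp.1 == gp.2) : Int)
            - (l.countP (fun gp => gp.1 != "O" && gp.2 == "O") : Int)
            - (l.countP (fun gp => gp.1 == "O" && gp.2 != "O") : Int)),
       m + (l.countP (fun gp => gp.1 != "O" && gp.2 == "O") : Int),
       s + (l.countP (fun gp => gp.1 == "O" && gp.2 != "O") : Int)) := by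
  induction l generalizing c i m s with
  | nil => simp
  | cons a t ih =>
    simp only [List.foldl_cons, List.countP_cons, List.length_cons, muc5Step]
    split_ifs <;> rw [ih] <;> simp_all <;> omega

theorem muc5_outer (zl : List (List String × List String)) (c i m s : Int) :
    zl.foldl (fun st gp => (gp.1.zip gp.2).foldl muc5Step st) (c, i, m, s) =
      (let pairs := zl.flatMap (fun gp => gp.1.zip gp.2)
       (c + (pairs.countP (fun gp => gp.1 == gp.2) : Int),
        i + ((pairs.length : Int) - (pairs.countP (fun gp => gp.1 == gp.2) : Int)
             - (pairs.countP (fun gp => gp.1 != "O" && gp.2 == "O") : Int)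
             - (pairs.countP (fun gp => gp.1 == "O" && gp.2 != "O") : Int)),
        m + (pairs.countP (fun gp => gp.1 != "O" && gp.2 == "O") : Int),
        s + (pairs.countP (fun gp => gp.1 == "O" && gp.2 != "O") : Int))) := by
  induction zl generalizing c i m s with
  | nil => simp
  | cons a t ih =>
    simp only [List.foldl_cons, muc5_foldl_counts, List.flatMap_cons, ih,
      List.countP_append, List.length_append]
    push_cast
    refine Prod.ext (by ring) (Prod.ext (by ring) (Prod.ext (by ring) (by ring)))

theorem compute_muc5_spec : Claim_equal_compute_muc5 := by
  intro gold pred _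
  unfold Spec_compute_muc5 compute_muc5 compute_muc5_alt
  rw [muc5_outer]
  simp
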